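-- pv_equiv track=rewrite | github.com/daniel-reich/turbo-robot | Wd9cCvFKC3fHzgqSx_10.py | num_split
-- ===== SOURCE A (Python) =====
-- def num_split(num):
--     sign = 1
--     if num < 0:
--         sign = -1
--         num = -num
--     n = len(str(num))
--     ans = []
--     for p in range(n - 1, -1, -1):
--         p10 = 10**p
--         ans.append(sign * (num // p10) * p10)
--         num %= p10
--     return ans
-- ===== SOURCE B (Python) =====
-- def num_split(num):
--     sign = -1 if num < 0 else 1
--     s = str(abs(num))
--     n = len(s)
--     return [sign * int(ch) * 10 ** (n - 1 - i) for i, ch in enumerate(s)]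
-- ===== Notes on version B (the rewrite author's own statement) =====
-- stated objective: idiomatic
-- what changed: B reads the digits straight off the decimal string with enumerate and builds each signed place value by a comprehension, instead of A's loop that repeatedly floor-divides and keeps a running remainder.
import Mathlib
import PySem

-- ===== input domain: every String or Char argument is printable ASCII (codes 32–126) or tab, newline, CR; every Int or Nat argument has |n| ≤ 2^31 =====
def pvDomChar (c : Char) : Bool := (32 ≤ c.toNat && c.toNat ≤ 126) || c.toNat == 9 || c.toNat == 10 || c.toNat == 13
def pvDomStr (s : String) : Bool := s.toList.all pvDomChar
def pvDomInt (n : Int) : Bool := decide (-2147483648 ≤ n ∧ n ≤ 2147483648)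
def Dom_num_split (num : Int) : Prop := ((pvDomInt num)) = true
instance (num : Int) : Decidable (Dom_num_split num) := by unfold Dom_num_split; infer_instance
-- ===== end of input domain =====

-- B reads the signed place values straight off the decimal string (enumerate + comprehension)
-- instead of A's running-remainder loop of floor divisions; objective: idiomatic, same cost.

-- ===== PORT A =====
-- loop 'for p in range(n-1,-1,-1)' as a foldl over PySem.List.pyRange with state (num, ans);
-- '10**p' is ported as 10 ^ p.toNat, exact here since every p in the range is ≥ 0.
def num_split (num : Int) : List Int :=
  let sign : Int := if num < 0 then -1 else 1
  let num' : Int := if num < 0 then -num else num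
  let n : Int := PySem.Str.len (PySem.Int.toStr num')
  ((PySem.List.pyRange (n - 1) (-1) (-1)).foldl
    (fun (st : Int × List Int) p =>
      let p10 : Int := 10 ^ p.toNat
      (PySem.Int.mod st.1 p10, st.2 ++ [sign * PySem.Int.floordiv st.1 p10 * p10]))
    (num', [])).2

-- ===== PORT B =====
-- 'int(ch)' is ported as the char code minus 48, exact for the digit characters of str(abs(num));
-- '10**(n-1-i)' as 10 ^ (n-1-i).toNat, exact since i < n in the enumeration.
def num_split_alt (num : Int) : List Int :=
  let sign : Int := if num < 0 then -1 else 1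
  let s := PySem.Int.toStr |num|
  let n : Int := PySem.Str.len s
  (PySem.List.enumerate s.toList 0).map
    (fun ic => sign * ((ic.2.toNat : Int) - 48) * 10 ^ (n - 1 - ic.1).toNat)

-- ===== PRECONDITION & SPEC =====
def Spec_num_split (num : Int) (out : List Int) : Prop := out = num_split_alt num
instance (num : Int) (out : List Int) : Decidable (Spec_num_split num out) := by unfold Spec_num_split; infer_instance

-- ===== CLAIM (what is proved, stated in full; the proofs are below) =====
def Claim_equal_num_split : Prop := ∀ (num : Int), Dom_num_split num → Spec_num_split num (num_split num)

-- ===== LEMMAS AND PROOFS =====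

/-- The most-significant-first decimal digit characters of a natural number. -/
def pvDigs (m : Nat) : List Char :=
  if _h : m < 10 then [Nat.digitChar m]
  else pvDigs (m / 10) ++ [Nat.digitChar (m % 10)]
termination_by m
decreasing_by exact Nat.div_lt_self (by omega) (by norm_num)

lemma pvDigs_toDigitsCore : ∀ (f m : Nat) (acc : List Char), m < 10 ^ (f + 1) →
    Nat.toDigitsCore 10 (f + 1) m acc = pvDigs m ++ acc := by
  intro f
  induction f with
  | zero =>
    intro m acc hm
    have hm10 : m < 10 := by simpa using hm
    rw [pvDigs]
    simp [Nat.toDigitsCore, Nat.div_eq_of_lt hm10, Nat.mod_eq_of_lt hm10, hm10]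
  | succ f ih =>
    intro m acc hm
    by_cases h10 : m < 10
    · rw [pvDigs]
      simp [Nat.toDigitsCore, Nat.mod_eq_of_lt h10, h10]
    · have hdiv : m / 10 < 10 ^ (f + 1) := by
        apply Nat.div_lt_of_lt_mul
        calc m < 10 ^ (f + 1 + 1) := hm
        _ = 10 * 10 ^ (f + 1) := by ring
      have hne : ¬ (m / 10 = 0) := by omega
      have hstep : Nat.toDigitsCore 10 (f + 1 + 1) m acc
          = Nat.toDigitsCore 10 (f + 1) (m / 10) (Nat.digitChar (m % 10) :: acc) := by
        conv_lhs => rw [Nat.toDigitsCore]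
        simp [hne]
      rw [pvDigs]
      simp only [h10, dite_false]
      rw [hstep, ih (m / 10) _ hdiv]
      simp
lemma pvToChars_eq (m : Nat) : PySem.Int.toChars (m : Int) = pvDigs m := by
  have h1 : ¬ ((m : Int) < 0) := by omega
  have h2 : m < 10 ^ (m + 1) := by
    calc m < 10 ^ m := Nat.lt_pow_self (by norm_num)
    _ ≤ 10 ^ (m + 1) := Nat.pow_le_pow_right (by norm_num) (by omega)
  simp only [PySem.Int.toChars, h1, if_false, Int.toNat_natCast]
  rw [show Nat.toDigits 10 m = Nat.toDigitsCore 10 (m + 1) m [] from rfl,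
    pvDigs_toDigitsCore m m [] h2, List.append_nil]

lemma pvDigs_lt (m : Nat) : m < 10 ^ (pvDigs m).length := by
  by_cases h : m < 10
  · rw [pvDigs]; simp [h]
  · rw [pvDigs]
    simp only [h, dite_false]
    have ih := pvDigs_lt (m / 10)
    simp only [List.length_append, List.length_singleton]
    have : m = 10 * (m / 10) + m % 10 := (Nat.div_add_mod m 10).symm ▸ by omega
    calc m < 10 * 10 ^ (pvDigs (m / 10)).length := by omega
    _ = 10 ^ ((pvDigs (m / 10)).length + 1) := by ring
termination_by m
decreasing_by exact Nat.div_lt_self (by omega) (by norm_num)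

lemma pvDigit_mod_pow (m k p : Nat) (h : p < k) :
    m % 10 ^ k / 10 ^ p % 10 = m / 10 ^ p % 10 := by
  conv_rhs => rw [← Nat.div_add_mod m (10 ^ k)]
  have hk : 10 ^ k = 10 ^ p * 10 ^ (k - p) := by
    rw [← pow_add]; congr 1; omega
  have hkp : 10 ^ (k - p) = 10 * 10 ^ (k - p - 1) := by
    rw [← pow_succ']; congr 1; omega
  rw [hk, mul_assoc, Nat.mul_add_div (by positivity)]
  rw [hkp]
  rw [mul_assoc, Nat.mul_add_mod]

lemma pvDigs_get (m : Nat) : ∀ (i : Nat) (h : i < (pvDigs m).length),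
    (pvDigs m)[i] = Nat.digitChar (m / 10 ^ ((pvDigs m).length - 1 - i) % 10) := by
  by_cases h10 : m < 10
  · rw [pvDigs]
    simp only [h10, dite_true]
    intro i hi
    simp only [List.length_singleton] at hi
    interval_cases i
    simp [Nat.mod_eq_of_lt h10]
  · rw [pvDigs]
    simp only [h10, dite_false]
    intro i hi
    have ih := pvDigs_get (m / 10)
    simp only [List.length_append, List.length_singleton] at hi ⊢
    set L := (pvDigs (m / 10)).length with hL
    have hLpos : 1 ≤ L := by
      rw [hL, pvDigs]
      by_cases h' : m / 10 < 10 <;> simp [h']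
    by_cases hiL : i < L
    · rw [List.getElem_append_left hiL]
      rw [ih i hiL]
      congr 2
      rw [Nat.div_div_eq_div_mul, ← pow_succ']
      congr 2
      omega
    · have hieq : i = L := by omega
      subst hieq
      rw [List.getElem_append_right (by omega)]
      simp only [List.getElem_singleton]
      have : L + 1 - 1 - L = 0 := by omega
      rw [this]
      simp
termination_by m
decreasing_by exact Nat.div_lt_self (by omega) (by norm_num)

lemma pvDigitChar_toNat (d : Nat) (h : d < 10) : (Nat.digitChar d).toNat = d + 48 := by
  interval_cases d <;> rfl

lemma pvNatCast_fdiv (a b : Nat) : Int.fdiv (a : Int) (b : Int) = ((a / b : Nat) : Int) := by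
  rw [Int.fdiv_eq_ediv]; push_cast; rfl
lemma pvNatCast_fmod (a b : Nat) : Int.fmod (a : Int) (b : Int) = ((a % b : Nat) : Int) := by
  rw [Int.fmod_eq_emod]; push_cast; rfl

/-- A's loop, characterised: it appends `sign * digit(p) * 10^p` for `p = k-1 … 0`. -/
lemma pvFoldA (sign : Int) : ∀ (k : Nat) (m : Nat) (acc : List Int), m < 10 ^ k →
    (((PySem.List.pyRange ((k : Int) - 1) (-1) (-1)).foldl
      (fun (st : Int × List Int) p =>
        (PySem.Int.mod st.1 (10 ^ p.toNat),
         st.2 ++ [sign * PySem.Int.floordiv st.1 (10 ^ p.toNat) * 10 ^ p.toNat]))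
      ((m : Int), acc))).2
    = acc ++ (List.range k).map
        (fun i => sign * ((m / 10 ^ (k - 1 - i) % 10 : Nat) : Int) * 10 ^ (k - 1 - i)) := by
  intro k
  induction k with
  | zero =>
    intro m acc hm
    rw [PySem.List.pyRange_neg_one_eq_nil (by omega)]
    simp
  | succ k ih =>
    intro m acc hm
    have hcons : ((k + 1 : Nat) : Int) - 1 = (k : Int) := by push_cast; ring
    rw [hcons, PySem.List.pyRange_neg_one_cons (by omega)]
    simp only [List.foldl_cons]
    have htoNat : ((k : Int)).toNat = k := Int.toNat_natCast k
    have hpow : ((10 : Int) ^ k) = ((10 ^ k : Nat) : Int) := by push_cast; ring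
    have hmod : PySem.Int.mod (m : Int) (10 ^ ((k : Int)).toNat) = ((m % 10 ^ k : Nat) : Int) := by
      rw [htoNat, hpow, PySem.Int.mod, pvNatCast_fmod]
    have hdivlt : m / 10 ^ k < 10 := by
      apply Nat.div_lt_of_lt_mul
      calc m < 10 ^ (k + 1) := hm
      _ = 10 ^ k * 10 := by ring
    have hdiv : PySem.Int.floordiv (m : Int) (10 ^ ((k : Int)).toNat)
        = ((m / 10 ^ k % 10 : Nat) : Int) := by
      rw [htoNat, hpow, PySem.Int.floordiv, pvNatCast_fdiv, Nat.mod_eq_of_lt hdivlt]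
    rw [hmod, hdiv, htoNat, hpow]
    rw [ih (m % 10 ^ k) _ (Nat.mod_lt _ (by positivity))]
    rw [List.range_succ_eq_map]
    simp only [List.map_cons, List.map_map, List.append_assoc, List.singleton_append]
    congr 1
    congr 1
    apply List.map_congr_left
    intro i hi
    simp only [List.mem_range] at hi
    simp only [Function.comp_apply]
    have h1 : k + 1 - 1 - (i + 1) = k - 1 - i := by omega
    have h2 : m % 10 ^ k / 10 ^ (k - 1 - i) % 10 = m / 10 ^ (k - 1 - i) % 10 :=
      pvDigit_mod_pow m k (k - 1 - i) (by omega)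
    rw [h1, h2]

/-- B's comprehension over the digit characters equals the same canonical list. -/
lemma pvMapB (sign : Int) (m : Nat) :
    (PySem.List.enumerate (pvDigs m) 0).map
      (fun ic => sign * ((ic.2.toNat : Int) - 48) * 10 ^ ((((pvDigs m).length : Int) - 1 - ic.1).toNat))
    = (List.range (pvDigs m).length).map
        (fun i => sign * ((m / 10 ^ ((pvDigs m).length - 1 - i) % 10 : Nat) : Int)
          * 10 ^ ((pvDigs m).length - 1 - i)) := by
  set k := (pvDigs m).length with hk
  rw [PySem.List.enumerate_eq_zipIdx_map]
  apply List.ext_getElem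
  · simp [hk]
  · intro i h1 h2
    simp only [List.getElem_map, List.getElem_range, List.getElem_zipIdx]
    have hik : i < k := by simpa [hk] using h2
    have hget := pvDigs_get m i (by omega)
    have hd : m / 10 ^ (k - 1 - i) % 10 < 10 := Nat.mod_lt _ (by norm_num)
    rw [hget]
    rw [pvDigitChar_toNat _ hd]
    have he : (((k : Int) - 1 - (0 + (((0 + i : Nat)) : Int))).toNat) = k - 1 - i := by omega
    rw [he]
    push_cast
    ring

lemma pv_main (num : Int) : num_split num = num_split_alt num := by
  unfold num_split num_split_alt
  dsimp only
  have habs : (if num < 0 then -num else num) = ((num.natAbs : Nat) : Int) := by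
    split_ifs with h <;> omega
  have habs2 : |num| = ((num.natAbs : Nat) : Int) := by
    rw [Int.abs_eq_natAbs]
  rw [habs, habs2]
  set m := num.natAbs with hm
  have hlen : PySem.Str.len (PySem.Int.toStr ((m : Nat) : Int)) = (((pvDigs m).length : Nat) : Int) := by
    rw [PySem.Str.len_eq, PySem.Int.toList_toStr, pvToChars_eq]
  rw [hlen]
  have hA := pvFoldA (if num < 0 then -1 else 1) (pvDigs m).length m [] (pvDigs_lt m)
  simp only [PySem.Int.toList_toStr, pvToChars_eq]
  rw [hA, List.nil_append, ← pvMapB (if num < 0 then -1 else 1) m]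

-- ===== VERDICT (by name: the statement is the Claim_ definition above) =====
theorem num_split_spec : Claim_equal_num_split := by
  intro num _
  unfold Spec_num_split
  exact pv_main num
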